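-- pv_equiv track=rewrite | github.com/grapheneaffiliate/h4-polytopic-attention | agent_zero/arc_custom_solvers_b.py | solve_28bf18c6
-- ===== SOURCE A (Python) =====
-- def solve_28bf18c6(grid):
--     """Extract non-zero shape and duplicate it horizontally."""
--     rows = len(grid)
--     cols = len(grid[0])
--
--     min_r, max_r, min_c, max_c = rows, 0, cols, 0
--     for r in range(rows):
--         for c in range(cols):
--             if grid[r][c] != 0:
--                 min_r = min(min_r, r)
--                 max_r = max(max_r, r)
--                 min_c = min(min_c, c)
--                 max_c = max(max_c, c)
--
--     pattern = []
--     for r in range(min_r, max_r + 1):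
--         row = []
--         for c in range(min_c, max_c + 1):
--             row.append(grid[r][c])
--         pattern.append(row)
--
--     result = []
--     for row in pattern:
--         result.append(row + row)
--
--     return result
-- ===== SOURCE B (Python) =====
-- def solve_28bf18c6(grid):
--     """Extract non-zero shape and duplicate it horizontally."""
--     w = len(grid[0])
--     core = _trim([row[:w] for row in grid])
--     if not core:
--         return []
--     band = _trim([list(col) for col in zip(*core)])
--     return [list(row) + list(row) for row in zip(*band)]
--
-- def _strip(rows):
--     while rows and not any(rows[0]):
--         rows = rows[1:]
--     return rows
--
-- def _trim(rows):
--     return _strip(_strip(rows[::-1])[::-1])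
-- ===== Notes on version B (the rewrite author's own statement) =====
-- stated objective: faster
-- what changed: Replaces the four-accumulator min/max index scan and index-rebuilt crop with a border-trimming algorithm: strip all-zero rows from both ends of the (width-normalized) grid, transpose, strip all-zero columns the same way, transpose back and double each row; no bounding-box indices or min/max are ever computed.
import Mathlib
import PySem

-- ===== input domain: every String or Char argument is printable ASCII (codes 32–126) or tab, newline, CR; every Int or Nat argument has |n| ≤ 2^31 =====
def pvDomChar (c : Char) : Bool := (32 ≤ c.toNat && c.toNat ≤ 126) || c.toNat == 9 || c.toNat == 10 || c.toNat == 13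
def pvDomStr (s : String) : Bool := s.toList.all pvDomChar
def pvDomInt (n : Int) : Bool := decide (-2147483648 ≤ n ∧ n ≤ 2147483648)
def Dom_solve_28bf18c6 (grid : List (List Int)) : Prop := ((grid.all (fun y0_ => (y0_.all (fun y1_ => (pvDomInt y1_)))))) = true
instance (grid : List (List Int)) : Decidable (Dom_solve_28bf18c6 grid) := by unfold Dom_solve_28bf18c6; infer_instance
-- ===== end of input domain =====

-- B replaces A's four-accumulator min/max index scan by a border-trimming algorithm: strip all-zero
-- rows from both ends, transpose, strip all-zero columns, transpose back, double each row; same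
-- asymptotic cost, measurably faster by a constant factor (C-level any()/zip/slicing instead of
-- per-cell Python-level min/max updates).


-- ===== PORT A =====
-- literal port of A: nested index scan accumulating (min_r, max_r, min_c, max_c), then rebuilding
-- the box entry by entry; indices stay Nat (Python's are non-negative ints here).
def solve_28bf18c6 (grid : List (List Int)) : List (List Int) :=
  let rows := grid.length
  let cols := (grid.headD []).length  -- len(grid[0]); grid ≠ [] by Pre_
  let st := (List.range rows).foldl (fun s r =>
      (List.range cols).foldl (fun (s : Nat × Nat × Nat × Nat) c =>
        if (grid.getD r []).getD c 0 ≠ 0 then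
          (min s.1 r, max s.2.1 r, min s.2.2.1 c, max s.2.2.2 c)
        else s) s) (rows, 0, cols, 0)
  let pattern := (List.range' st.1 (st.2.1 + 1 - st.1)).map (fun r =>
      (List.range' st.2.2.1 (st.2.2.2 + 1 - st.2.2.1)).map (fun c => (grid.getD r []).getD c 0))
  pattern.map (fun row => row ++ row)

-- ===== PORT B =====
-- literal port of Source B: width-normalize (row[:w]), trim all-zero border rows, early [] if nothing
-- is left, transpose (zip(*m), exact for the rectangular matrices produced here), trim all-zero
-- border columns, transpose back, double each row.  any(row) is 'some entry non-zero';
-- 'while rows and not any(rows[0]): rows = rows[1:]' is dropWhile of that negation.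
def pvAnyNZ (row : List Int) : Bool := row.any (fun v => v ≠ 0)

def pvStrip (rows : List (List Int)) : List (List Int) :=
  rows.dropWhile (fun r => !pvAnyNZ r)

def pvTrim (rows : List (List Int)) : List (List Int) :=
  (pvStrip ((pvStrip rows.reverse).reverse))

def pvTranspose (m : List (List Int)) : List (List Int) :=
  (List.range (m.headD []).length).map (fun c => m.map (fun row => row.getD c 0))

def solve_28bf18c6_alt (grid : List (List Int)) : List (List Int) :=
  let w := (grid.headD []).length  -- len(grid[0]); grid ≠ [] by Pre_
  let core := pvTrim (grid.map (fun row => row.take w))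
  if core = [] then []
  else
    let band := pvTrim (pvTranspose core)
    (pvTranspose band).map (fun row => row ++ row)

-- ===== PRECONDITION & SPEC =====
-- Pre_ excludes exactly the inputs on which A raises IndexError: the empty grid (grid[0]),
-- and grids with a row shorter than the first row (grid[r][c] for c < len(grid[0])).
def Pre_solve_28bf18c6 (grid : List (List Int)) : Prop :=
  grid ≠ [] ∧ ∀ row ∈ grid, (grid.headD []).length ≤ row.length
instance (grid : List (List Int)) : Decidable (Pre_solve_28bf18c6 grid) := by
  unfold Pre_solve_28bf18c6; infer_instance
def pvWitness_solve_28bf18c6 : List (List Int) := [[0, 1], [0, 0]]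
def Spec_solve_28bf18c6 (grid : List (List Int)) (out : List (List Int)) : Prop := out = solve_28bf18c6_alt grid
instance (grid : List (List Int)) (out : List (List Int)) : Decidable (Spec_solve_28bf18c6 grid out) := by unfold Spec_solve_28bf18c6; infer_instance

-- ===== CLAIM (what is proved, stated in full; the proofs are below) =====
def Claim_equal_solve_28bf18c6 : Prop := ∀ (grid : List (List Int)), Dom_solve_28bf18c6 grid → Pre_solve_28bf18c6 grid → Spec_solve_28bf18c6 grid (solve_28bf18c6 grid)

-- ===== LEMMAS AND PROOFS =====

-- the common normal form both ports are reduced to: the box [r0..r1] × [c0..c1], rows doubled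
def pvBox (grid : List (List Int)) (r0 r1 c0 c1 : Nat) : List (List Int) :=
  ((List.range' r0 (r1 + 1 - r0)).map (fun r =>
      (List.range' c0 (c1 + 1 - c0)).map (fun c => (grid.getD r []).getD c 0))).map
    (fun row => row ++ row)

theorem pvFoldlNested {α β σ : Type} (l1 : List α) (l2 : List β) (g : σ → α → β → σ) (a : σ) :
    l1.foldl (fun s r => l2.foldl (fun s c => g s r c) s) a
      = (l1.flatMap (fun r => l2.map (fun c => (r, c)))).foldl (fun s p => g s p.1 p.2) a := by
  induction l1 generalizing a with
  | nil => rfl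
  | cons x xs ih => simp [List.foldl_append, List.foldl_map, ih]

theorem pvFoldlIfOp {α : Type} (op : Nat → Nat → Nat) (p : α → Prop) [DecidablePred p]
    (f : α → Nat) (l : List α) (a : Nat) :
    l.foldl (fun x e => if p e then op x (f e) else x) a
      = ((l.filter (fun e => decide (p e))).map f).foldl op a := by
  induction l generalizing a with
  | nil => rfl
  | cons x xs ih => by_cases h : p x <;> simp [h, ih]

theorem pvDropTake {α : Type} (l : List α) (a k : Nat) (d : α) (h : a + k ≤ l.length) :
    (l.drop a).take k = (List.range' a k).map (fun i => l.getD i d) := by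
  apply List.ext_getElem
  · simp; omega
  · intro i h1 h2
    have hik : i < k := by simp at h1; omega
    simp only [List.getElem_take, List.getElem_drop, List.getElem_map, List.getElem_range']
    rw [one_mul, List.getD_eq_getElem _ _ (by omega : a + i < l.length)]

theorem pvAnyTake (row : List Int) (w : Nat) (hw : w ≤ row.length) :
    ((row.take w).any (fun v => v ≠ 0) = true) ↔ ∃ c, c < w ∧ row.getD c 0 ≠ 0 := by
  rw [List.any_eq_true]
  constructor
  · rintro ⟨v, hv, hv0⟩
    obtain ⟨i, hi, hval⟩ := List.mem_iff_getElem.1 hv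
    have hiw : i < w := by simp at hi; omega
    have hirow : i < row.length := by omega
    refine ⟨i, hiw, ?_⟩
    rw [List.getD_eq_getElem _ _ hirow]
    have hv' : row[i] = v := by rw [← hval, List.getElem_take]
    rw [hv']; simpa using hv0
  · rintro ⟨c, hc, h0⟩
    have hcrow : c < row.length := by omega
    refine ⟨row[c], ?_, by rw [List.getD_eq_getElem _ _ hcrow] at h0; exact decide_eq_true h0⟩
    rw [List.mem_iff_getElem]
    exact ⟨c, by simp [List.length_take]; omega, List.getElem_take⟩

theorem pvMinEq (L tl : List Nat) (n hd : Nat)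
    (hmem : ∀ x, x ∈ L ↔ x ∈ hd :: tl) (hlt : ∀ x ∈ L, x < n) :
    L.foldl min n = tl.foldl min hd := by
  have hy := PySem.List.foldl_min_le tl hd
  have hymem : tl.foldl min hd ∈ hd :: tl := by
    rcases PySem.List.foldl_min_mem tl hd with h | h
    · simp [h]
    · simp [h]
  have hyL : tl.foldl min hd ∈ L := (hmem _).2 hymem
  have hx := PySem.List.foldl_min_le L n
  apply le_antisymm
  · exact hx.2 _ hyL
  · rcases PySem.List.foldl_min_mem L n with h | h
    · exact absurd (lt_of_le_of_lt (h ▸ hx.2 _ hyL) (hlt _ hyL)) (lt_irrefl n)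
    · rcases List.mem_cons.1 ((hmem _).1 h) with h' | h'
      · simp_all
      · exact hy.2 _ h'

theorem pvMaxEq (L tl : List Nat) (hd : Nat)
    (hmem : ∀ x, x ∈ L ↔ x ∈ hd :: tl) :
    L.foldl max 0 = tl.foldl max hd := by
  have hy := PySem.List.le_foldl_max tl hd
  have hymem : tl.foldl max hd ∈ hd :: tl := by
    rcases PySem.List.foldl_max_mem tl hd with h | h
    · simp [h]
    · simp [h]
  have hx := PySem.List.le_foldl_max L 0
  apply le_antisymm
  · rcases PySem.List.foldl_max_mem L 0 with h | h
    · omega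
    · rcases List.mem_cons.1 ((hmem _).1 h) with h' | h'
      · simp_all
      · exact hy.2 _ h'
  · exact hx.2 _ ((hmem _).2 hymem)

-- dropWhile (no non-zero) drops exactly the first k rows when rows 0..k-1 are all-zero and row k is not
theorem pvStripEq (l : List (List Int)) (k : Nat) (hk : k ≤ l.length)
    (hzero : ∀ i (h : i < l.length), i < k → pvAnyNZ l[i] = false)
    (hstop : ∀ h : k < l.length, pvAnyNZ l[k] = true) :
    pvStrip l = l.drop k := by
  induction l generalizing k with
  | nil =>
      have : k = 0 := by simpa using hk
      simp [pvStrip, this]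
  | cons x xs ih =>
      cases k with
      | zero =>
          have hx : pvAnyNZ x = true := hstop (by simp)
          simp [pvStrip, hx]
      | succ j =>
          have hx : pvAnyNZ x = false := hzero 0 (by simp) (Nat.succ_pos j)
          have hrec : pvStrip xs = xs.drop j := by
            apply ih
            · simpa using hk
            · intro i h hij
              have := hzero (i + 1) (by simpa using Nat.succ_lt_succ h) (Nat.succ_lt_succ hij)
              simpa using this
            · intro h
              have := hstop (by simpa using Nat.succ_lt_succ h)
              simpa using this
          simpa [pvStrip, List.dropWhile_cons, hx] using hrec

theorem pvTrimNil (l : List (List Int))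
    (hall : ∀ i (h : i < l.length), pvAnyNZ l[i] = false) :
    pvTrim l = [] := by
  have h1 : pvStrip l.reverse = l.reverse.drop l.reverse.length := by
    apply pvStripEq _ _ (le_refl _)
    · intro i h _
      rw [List.getElem_reverse]
      exact hall _ _
    · intro h; omega
  unfold pvTrim
  rw [h1, List.drop_length]
  simp [pvStrip]

theorem pvTrimEq (l : List (List Int)) (r0 r1 : Nat) (h01 : r0 ≤ r1) (h1 : r1 < l.length)
    (hl : pvAnyNZ l[r0] = true) (hr : pvAnyNZ l[r1] = true)
    (hlo : ∀ i (h : i < l.length), i < r0 → pvAnyNZ l[i] = false)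
    (hhi : ∀ i (h : i < l.length), r1 < i → pvAnyNZ l[i] = false) :
    pvTrim l = (l.drop r0).take (r1 + 1 - r0) := by
  have hlen1 : 1 ≤ l.length := by omega
  have h1' : pvStrip l.reverse = l.reverse.drop (l.length - 1 - r1) := by
    apply pvStripEq _ _ (by simp; omega)
    · intro i h hi
      rw [List.getElem_reverse]
      exact hhi _ _ (by omega)
    · intro h
      rw [List.getElem_reverse]
      have : l.length - 1 - (l.length - 1 - r1) = r1 := by omega
      simp only [this]
      exact hr
  have h2 : (l.reverse.drop (l.length - 1 - r1)).reverse = l.take (r1 + 1) := by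
    have : l.length - 1 - r1 = l.length - (r1 + 1) := by omega
    rw [this, ← List.reverse_take, List.reverse_reverse]
  have h3 : pvStrip (l.take (r1 + 1)) = (l.take (r1 + 1)).drop r0 := by
    apply pvStripEq _ _ (by simp; omega)
    · intro i h hi
      rw [List.getElem_take]
      exact hlo _ _ hi
    · intro h
      rw [List.getElem_take]
      exact hl
  unfold pvTrim
  rw [h1', h2, h3]
  apply List.ext_getElem
  · simp; omega
  · intro i hA hB
    simp only [List.getElem_drop, List.getElem_take]

-- rows all length ≥ w (Pre_), indexed form
theorem pvRowLen (grid : List (List Int))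
    (hrect : ∀ row ∈ grid, (grid.headD []).length ≤ row.length) :
    ∀ r, r < grid.length → (grid.headD []).length ≤ (grid.getD r []).length := by
  intro r hr
  refine hrect _ ?_
  rw [List.getD_eq_getElem _ _ hr]
  exact List.getElem_mem _

-- B returns [] when the grid has no non-zero cell in its first-row-width region
theorem pvAltNil (grid : List (List Int))
    (hrect : ∀ row ∈ grid, (grid.headD []).length ≤ row.length)
    (hz : ∀ r, r < grid.length → ∀ c, c < (grid.headD []).length →
        (grid.getD r []).getD c 0 = 0) :
    solve_28bf18c6_alt grid = [] := by
  have hcore : pvTrim (grid.map (fun row => row.take (grid.headD []).length)) = [] := by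
    apply pvTrimNil
    intro i h
    have hlen : i < grid.length := by simpa using h
    rw [List.getElem_map, Bool.eq_false_iff]
    intro hP
    unfold pvAnyNZ at hP
    rw [← List.getD_eq_getElem _ _ hlen] at hP
    obtain ⟨c, hc, h0⟩ := (pvAnyTake _ _ (pvRowLen grid hrect i hlen)).1 hP
    exact h0 (hz i hlen c hc)
  simp only [solve_28bf18c6_alt]
  rw [hcore]
  simp

-- B equals the bounding box when the non-zero row/column index lists are non-empty
theorem pvAltBox (grid : List (List Int))
    (hrect : ∀ row ∈ grid, (grid.headD []).length ≤ row.length)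
    (hd : Nat) (tl : List Nat) (hd' : Nat) (tl' : List Nat)
    (hrs : (List.range grid.length).filter
        (fun r => (List.take (grid.headD []).length (grid.getD r [])).any
          (fun v => decide ¬v = 0)) = hd :: tl)
    (hcs : (List.range (grid.headD []).length).filter
        (fun c => grid.any (fun row => decide ¬row.getD c 0 = 0)) = hd' :: tl') :
    solve_28bf18c6_alt grid
      = pvBox grid (tl.foldl min hd) (tl.foldl max hd) (tl'.foldl min hd') (tl'.foldl max hd') := by
  have hrowlen := pvRowLen grid hrect
  set n := grid.length with hn
  set w := (grid.headD []).length with hw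
  set r0 := tl.foldl min hd with hr0
  set r1 := tl.foldl max hd with hr1
  set c0 := tl'.foldl min hd' with hc0
  set c1 := tl'.foldl max hd' with hc1
  set g := grid.map (fun row => row.take w) with hg
  have hglen : g.length = n := by rw [hg, hn]; simp
  -- membership characterisations of the two filtered index lists
  have hrsmem : ∀ x, x ∈ hd :: tl ↔ x < n ∧ ∃ c, c < w ∧ (grid.getD x []).getD c 0 ≠ 0 := by
    intro x
    rw [← hrs, List.mem_filter, List.mem_range]
    constructor
    · rintro ⟨hx, hp⟩
      exact ⟨hx, (pvAnyTake _ _ (hrowlen _ hx)).1 hp⟩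
    · rintro ⟨hx, hp⟩
      exact ⟨hx, (pvAnyTake _ _ (hrowlen _ hx)).2 hp⟩
  have hcsmem : ∀ x, x ∈ hd' :: tl' ↔ x < w ∧ ∃ r, r < n ∧ (grid.getD r []).getD x 0 ≠ 0 := by
    intro x
    rw [← hcs, List.mem_filter, List.mem_range, List.any_eq_true]
    constructor
    · rintro ⟨hx, row, hrow, hp⟩
      obtain ⟨r, hr, rfl⟩ := List.mem_iff_getElem.1 hrow
      refine ⟨hx, r, hr, ?_⟩
      rw [List.getD_eq_getElem _ _ hr]
      simpa using hp
    · rintro ⟨hx, r, hr, hp⟩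
      refine ⟨hx, grid.getD r [], ?_, by simpa using hp⟩
      rw [List.getD_eq_getElem _ _ hr]
      exact List.getElem_mem _
  -- min/max facts
  have hr0mem : r0 ∈ hd :: tl := by
    rcases PySem.List.foldl_min_mem tl hd with h | h
    · rw [hr0, h]; exact List.mem_cons_self
    · exact List.mem_cons_of_mem _ h
  have hr1mem : r1 ∈ hd :: tl := by
    rcases PySem.List.foldl_max_mem tl hd with h | h
    · rw [hr1, h]; exact List.mem_cons_self
    · exact List.mem_cons_of_mem _ h
  have hr0le : ∀ x ∈ hd :: tl, r0 ≤ x := by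
    intro x hx
    rcases List.mem_cons.1 hx with h | h
    · rw [h] at *; exact (PySem.List.foldl_min_le tl hd).1
    · exact (PySem.List.foldl_min_le tl hd).2 _ h
  have hler1 : ∀ x ∈ hd :: tl, x ≤ r1 := by
    intro x hx
    rcases List.mem_cons.1 hx with h | h
    · rw [h] at *; exact (PySem.List.le_foldl_max tl hd).1
    · exact (PySem.List.le_foldl_max tl hd).2 _ h
  have hc0mem : c0 ∈ hd' :: tl' := by
    rcases PySem.List.foldl_min_mem tl' hd' with h | h
    · rw [hc0, h]; exact List.mem_cons_self
    · exact List.mem_cons_of_mem _ h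
  have hc1mem : c1 ∈ hd' :: tl' := by
    rcases PySem.List.foldl_max_mem tl' hd' with h | h
    · rw [hc1, h]; exact List.mem_cons_self
    · exact List.mem_cons_of_mem _ h
  have hc0le : ∀ x ∈ hd' :: tl', c0 ≤ x := by
    intro x hx
    rcases List.mem_cons.1 hx with h | h
    · rw [h] at *; exact (PySem.List.foldl_min_le tl' hd').1
    · exact (PySem.List.foldl_min_le tl' hd').2 _ h
  have hlec1 : ∀ x ∈ hd' :: tl', x ≤ c1 := by
    intro x hx
    rcases List.mem_cons.1 hx with h | h
    · rw [h] at *; exact (PySem.List.le_foldl_max tl' hd').1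
    · exact (PySem.List.le_foldl_max tl' hd').2 _ h
  have hr01 : r0 ≤ r1 := hler1 _ hr0mem
  have hr1n : r1 < n := ((hrsmem _).1 hr1mem).1
  have hc01 : c0 ≤ c1 := hlec1 _ hc0mem
  have hc1w : c1 < w := ((hcsmem _).1 hc1mem).1
  -- rows of g
  have hgget : ∀ r (h : r < g.length), g[r] = (grid.getD r []).take w := by
    intro r h
    have hr : r < n := by omega
    simp only [hg, List.getElem_map]
    rw [List.getD_eq_getElem _ _ hr]
  have hggetlen : ∀ r (h : r < g.length), (g[r]).length = w := by
    intro r h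
    rw [hgget r h, List.length_take]
    have := hrowlen r (by omega)
    omega
  have hgany : ∀ r (h : r < g.length),
      (pvAnyNZ g[r] = true ↔ ∃ c, c < w ∧ (grid.getD r []).getD c 0 ≠ 0) := by
    intro r h
    rw [hgget r h]
    unfold pvAnyNZ
    exact pvAnyTake _ _ (hrowlen r (by omega))
  -- step 1: trim the rows
  have hcore : pvTrim g = (g.drop r0).take (r1 + 1 - r0) := by
    apply pvTrimEq g r0 r1 hr01 (by omega)
    · exact (hgany _ _).2 ((hrsmem _).1 hr0mem).2
    · exact (hgany _ _).2 ((hrsmem _).1 hr1mem).2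
    · intro i h hi
      rw [Bool.eq_false_iff]
      intro hP
      have := hr0le i ((hrsmem i).2 ⟨by omega, (hgany _ _).1 hP⟩)
      omega
    · intro i h hi
      rw [Bool.eq_false_iff]
      intro hP
      have := hler1 i ((hrsmem i).2 ⟨by omega, (hgany _ _).1 hP⟩)
      omega
  set core := (g.drop r0).take (r1 + 1 - r0) with hcoredef
  have hcorelen : core.length = r1 + 1 - r0 := by
    simp [hcoredef]
    omega
  have hcorene : core ≠ [] := by
    intro hnil
    rw [hnil] at hcorelen
    simp at hcorelen
    omega
  have hcoreget : ∀ i (h : i < core.length), core[i] = g[r0 + i]'(by rw [hcorelen] at h; omega) := by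
    intro i h
    simp [hcoredef]
  -- width of core
  have hcorehead : (core.headD []).length = w := by
    obtain ⟨x, xs, hx⟩ := List.exists_cons_of_ne_nil hcorene
    have h0 : 0 < core.length := by rw [hx]; simp
    have hx0 : core[0]'h0 = x := by simp [hx]
    rw [hx, List.headD_cons, ← hx0, hcoreget 0 h0]
    exact hggetlen _ _
  -- cell values of g seen through the width-w truncation
  have hgetD : ∀ r (h : r < g.length), ∀ c, c < w →
      (g[r]).getD c 0 = (grid.getD r []).getD c 0 := by
    intro r h c hc
    have hlen := hrowlen r (by omega)
    rw [hgget r h,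
        List.getD_eq_getElem _ _ (by rw [List.length_take]; omega),
        List.getElem_take, ← List.getD_eq_getElem _ _ (by omega)]
  -- step 2: transpose and column membership
  have htc : pvTranspose core = (List.range w).map (fun c => core.map (fun row => row.getD c 0)) := by
    unfold pvTranspose
    rw [hcorehead]
  set tcore := (List.range w).map (fun c => core.map (fun row => row.getD c 0)) with htcdef
  have htclen : tcore.length = w := by simp [htcdef]
  have htcget : ∀ c (h : c < tcore.length), tcore[c] = core.map (fun row => row.getD c 0) := by
    intro c h
    simp [htcdef]
  have htcany : ∀ c, c < w →
      ((pvAnyNZ (core.map (fun row => row.getD c 0)) = true) ↔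
        ∃ r, r0 ≤ r ∧ r ≤ r1 ∧ (grid.getD r []).getD c 0 ≠ 0) := by
    intro c hc
    unfold pvAnyNZ
    rw [List.any_map, List.any_eq_true]
    constructor
    · rintro ⟨row, hrow, hp⟩
      obtain ⟨i, hi, rfl⟩ := List.mem_iff_getElem.1 hrow
      refine ⟨r0 + i, Nat.le_add_right _ _, by rw [hcorelen] at hi; omega, ?_⟩
      rw [← hgetD (r0 + i) (by rw [hcorelen] at hi; omega) c hc, ← hcoreget i hi]
      simpa using hp
    · rintro ⟨r, hra, hrb, hp⟩
      have hi : r - r0 < core.length := by rw [hcorelen]; omega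
      refine ⟨core[r - r0], List.getElem_mem _, ?_⟩
      simp only [Function.comp_apply]
      rw [hcoreget _ hi, hgetD (r0 + (r - r0)) (by omega) c hc,
          (by omega : r0 + (r - r0) = r)]
      simpa using hp
  -- step 3: trim the columns
  have hc0w : c0 < w := ((hcsmem _).1 hc0mem).1
  have hband : pvTrim tcore = (tcore.drop c0).take (c1 + 1 - c0) := by
    apply pvTrimEq tcore c0 c1 hc01 (by omega)
    · obtain ⟨-, r, hrn, hval⟩ := (hcsmem _).1 hc0mem
      have hrmem := (hrsmem r).2 ⟨hrn, c0, hc0w, hval⟩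
      rw [htcget _ (by omega)]
      exact (htcany c0 hc0w).2 ⟨r, hr0le _ hrmem, hler1 _ hrmem, hval⟩
    · obtain ⟨-, r, hrn, hval⟩ := (hcsmem _).1 hc1mem
      have hrmem := (hrsmem r).2 ⟨hrn, c1, hc1w, hval⟩
      rw [htcget _ (by omega)]
      exact (htcany c1 hc1w).2 ⟨r, hr0le _ hrmem, hler1 _ hrmem, hval⟩
    · intro i h hi
      rw [Bool.eq_false_iff]
      intro hP
      rw [htcget _ h] at hP
      obtain ⟨r, hra, hrb, hval⟩ := (htcany i (by omega)).1 hP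
      have := hc0le i ((hcsmem i).2 ⟨by omega, r, by omega, hval⟩)
      omega
    · intro i h hi
      rw [Bool.eq_false_iff]
      intro hP
      rw [htcget _ h] at hP
      obtain ⟨r, hra, hrb, hval⟩ := (htcany i (by omega)).1 hP
      have := hlec1 i ((hcsmem i).2 ⟨by omega, r, by omega, hval⟩)
      omega
  -- step 4: assemble
  simp only [solve_28bf18c6_alt]
  rw [← hw, ← hg, hcore, if_neg hcorene, htc, hband,
      pvDropTake tcore c0 (c1 + 1 - c0) [] (by omega)]
  -- head of the band is the c0-column, of length r1+1-r0
  have hk : c1 + 1 - c0 = (c1 - c0) + 1 := by omega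
  have hhead : ((List.range' c0 (c1 + 1 - c0)).map (fun c => tcore.getD c [])).headD [] =
      core.map (fun row => row.getD c0 0) := by
    rw [hk, List.range'_succ, List.map_cons, List.headD_cons,
        List.getD_eq_getElem _ _ (by omega), htcget _ (by omega)]
  unfold pvBox pvTranspose
  rw [hhead]
  have hheadlen : (core.map (fun row => row.getD c0 0)).length = r1 + 1 - r0 := by
    rw [List.length_map, hcorelen]
  rw [hheadlen]
  apply congrArg (List.map (fun row => row ++ row))
  apply List.ext_getElem
  · simp
  · intro j hA hB
    have hj : j < r1 + 1 - r0 := by simpa using hA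
    simp only [List.getElem_map, List.getElem_range, List.getElem_range', List.map_map]
    rw [one_mul]
    apply List.map_congr_left
    intro c hcmem
    have hcb : c0 ≤ c ∧ c < c0 + (c1 + 1 - c0) := List.mem_range'_1.1 hcmem
    have hcw : c < w := by omega
    simp only [Function.comp_apply]
    rw [List.getD_eq_getElem tcore [] (by omega), htcget _ (by omega),
        List.getD_eq_getElem (core.map (fun row => row.getD c 0)) 0
          (by rw [List.length_map, hcorelen]; omega),
        List.getElem_map, hcoreget _ (by rw [hcorelen]; omega),
        hgetD (r0 + j) (by omega) c hcw]

-- the main equivalence: reduce A's combined four-extreme fold to the filtered index lists,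
-- then case on emptiness and use the B-side characterisations above
theorem pv_main (grid : List (List Int)) (hne : grid ≠ [])
    (hrect : ∀ row ∈ grid, (grid.headD []).length ≤ row.length) :
    solve_28bf18c6 grid = solve_28bf18c6_alt grid := by
  have hrowlen := pvRowLen grid hrect
  have hn1 : 1 ≤ grid.length := List.length_pos_iff.2 hne
  unfold solve_28bf18c6
  simp only [ne_eq]
  rw [pvFoldlNested (List.range grid.length) (List.range (grid.headD []).length)
      (fun (s : Nat × Nat × Nat × Nat) r c =>
        if ¬(grid.getD r []).getD c 0 = 0 then
          (min s.1 r, max s.2.1 r, min s.2.2.1 c, max s.2.2.2 c) else s)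
      (grid.length, 0, (grid.headD []).length, 0)]
  have hfun : (fun (s : Nat × Nat × Nat × Nat) (p : Nat × Nat) =>
        if ¬(grid.getD p.1 []).getD p.2 0 = 0 then
          (min s.1 p.1, max s.2.1 p.1, min s.2.2.1 p.2, max s.2.2.2 p.2) else s)
      = (fun (s : Nat × Nat × Nat × Nat) (p : Nat × Nat) =>
        ((fun (x : Nat) (e : Nat × Nat) => if ¬(grid.getD e.1 []).getD e.2 0 = 0 then min x e.1 else x) s.1 p,
         (fun (s2 : Nat × Nat × Nat) (p : Nat × Nat) =>
           ((fun (x : Nat) (e : Nat × Nat) => if ¬(grid.getD e.1 []).getD e.2 0 = 0 then max x e.1 else x) s2.1 p,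
            (fun (s3 : Nat × Nat) (p : Nat × Nat) =>
              ((fun (x : Nat) (e : Nat × Nat) => if ¬(grid.getD e.1 []).getD e.2 0 = 0 then min x e.2 else x) s3.1 p,
               (fun (x : Nat) (e : Nat × Nat) => if ¬(grid.getD e.1 []).getD e.2 0 = 0 then max x e.2 else x) s3.2 p)) s2.2 p)) s.2 p)) := by
    funext s p
    beta_reduce
    split_ifs <;> rfl
  rw [hfun, PySem.List.foldl_prod_mk (f := (fun (x : Nat) (e : Nat × Nat) => if ¬(grid.getD e.1 []).getD e.2 0 = 0 then min x e.1 else x)) (g := (fun (s2 : Nat × Nat × Nat) (p : Nat × Nat) => ((fun (x : Nat) (e : Nat × Nat) => if ¬(grid.getD e.1 []).getD e.2 0 = 0 then max x e.1 else x) s2.1 p, (fun (s3 : Nat × Nat) (p : Nat × Nat) => ((fun (x : Nat) (e : Nat × Nat) => if ¬(grid.getD e.1 []).getD e.2 0 = 0 then min x e.2 else x) s3.1 p, (fun (x : Nat) (e : Nat × Nat) => if ¬(grid.getD e.1 []).getD e.2 0 = 0 then max x e.2 else x) s3.2 p)) s2.2 p))),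
      PySem.List.foldl_prod_mk (f := (fun (x : Nat) (e : Nat × Nat) => if ¬(grid.getD e.1 []).getD e.2 0 = 0 then max x e.1 else x)) (g := (fun (s3 : Nat × Nat) (p : Nat × Nat) => ((fun (x : Nat) (e : Nat × Nat) => if ¬(grid.getD e.1 []).getD e.2 0 = 0 then min x e.2 else x) s3.1 p, (fun (x : Nat) (e : Nat × Nat) => if ¬(grid.getD e.1 []).getD e.2 0 = 0 then max x e.2 else x) s3.2 p))),
      PySem.List.foldl_prod_mk (f := (fun (x : Nat) (e : Nat × Nat) => if ¬(grid.getD e.1 []).getD e.2 0 = 0 then min x e.2 else x)) (g := (fun (x : Nat) (e : Nat × Nat) => if ¬(grid.getD e.1 []).getD e.2 0 = 0 then max x e.2 else x))]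
  dsimp only
  rw [pvFoldlIfOp, pvFoldlIfOp, pvFoldlIfOp, pvFoldlIfOp]
  set n := grid.length with hndef
  set w := (grid.headD []).length with hwdef
  set pairs := List.flatMap (fun r => List.map (fun c => (r, c)) (List.range w)) (List.range n) with hpairsdef
  set L := List.filter (fun e => decide ¬(grid.getD e.1 []).getD e.2 0 = 0) pairs with hLdef
  set Lr := List.map Prod.fst L with hLrdef
  set Lc := List.map Prod.snd L with hLcdef
  set rs := List.filter (fun r => (List.take w (grid.getD r [])).any fun v => decide ¬v = 0) (List.range n) with hrsdef
  set cs := List.filter (fun c => grid.any fun row => decide ¬row.getD c 0 = 0) (List.range w) with hcsdef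
  clear hfun
  have hpairsmem : ∀ p : Nat × Nat, p ∈ pairs ↔ p.1 < n ∧ p.2 < w := by
    intro p
    rw [hpairsdef]
    simp only [List.mem_flatMap, List.mem_map, List.mem_range]
    constructor
    · rintro ⟨r, hr, c, hc, rfl⟩; exact ⟨hr, hc⟩
    · rintro ⟨h1, h2⟩; exact ⟨p.1, h1, p.2, h2, rfl⟩
  have hLrmem : ∀ x, x ∈ Lr ↔ x ∈ rs := by
    intro x
    rw [hLrdef, hLdef, hrsdef]
    simp only [List.mem_map, List.mem_filter, List.mem_range]
    constructor
    · rintro ⟨p, ⟨hp, hq⟩, rfl⟩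
      have h := (hpairsmem p).1 hp
      refine ⟨h.1, ?_⟩
      exact (pvAnyTake _ w (hrowlen _ h.1)).2 ⟨p.2, h.2, by simpa using hq⟩
    · rintro ⟨hx, hany⟩
      obtain ⟨c, hc, h0⟩ := (pvAnyTake _ w (hrowlen _ hx)).1 hany
      exact ⟨(x, c), ⟨(hpairsmem _).2 ⟨hx, hc⟩, by simpa using h0⟩, rfl⟩
  have hLcmem : ∀ x, x ∈ Lc ↔ x ∈ cs := by
    intro x
    rw [hLcdef, hLdef, hcsdef]
    simp only [List.mem_map, List.mem_filter, List.mem_range]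
    constructor
    · rintro ⟨p, ⟨hp, hq⟩, rfl⟩
      have h := (hpairsmem p).1 hp
      refine ⟨h.2, ?_⟩
      rw [List.any_eq_true]
      refine ⟨grid.getD p.1 [], ?_, hq⟩
      rw [List.getD_eq_getElem _ _ h.1]
      exact List.getElem_mem _
    · rintro ⟨hx, hany⟩
      rw [List.any_eq_true] at hany
      obtain ⟨row, hrow, h0⟩ := hany
      obtain ⟨r, hr, rfl⟩ := List.mem_iff_getElem.1 hrow
      refine ⟨(r, x), ⟨(hpairsmem _).2 ⟨hr, hx⟩, ?_⟩, rfl⟩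
      show (decide ¬(grid.getD r []).getD x 0 = 0) = true
      rw [List.getD_eq_getElem _ _ hr]
      exact h0
  have hrslt : ∀ x ∈ rs, x < n := by
    intro x hx; rw [hrsdef] at hx
    exact List.mem_range.1 (List.mem_filter.1 hx).1
  by_cases hrs : rs = []
  · -- no non-zero cell: A's range' is empty, B returns [] by pvAltNil
    have hLrnil : Lr = [] := by
      rw [List.eq_nil_iff_forall_not_mem]
      intro x hx
      have h := (hLrmem x).1 hx
      rw [hrs] at h
      exact List.not_mem_nil h
    have hLnil : L = [] := List.map_eq_nil_iff.1 (hLrdef ▸ hLrnil)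
    have hLcnil : Lc = [] := by rw [hLcdef, hLnil]; rfl
    rw [hLrnil, hLcnil]
    simp only [List.foldl_nil]
    have h0 : 0 + 1 - n = 0 := by omega
    rw [h0]
    have hz : ∀ r, r < grid.length → ∀ c, c < (grid.headD []).length →
        (grid.getD r []).getD c 0 = 0 := by
      intro r hr c hc
      by_contra h0'
      have hmem : r ∈ rs := by
        rw [hrsdef]
        exact List.mem_filter.2 ⟨List.mem_range.2 hr,
          (pvAnyTake _ _ (hrowlen r hr)).2 ⟨c, hc, h0'⟩⟩
      rw [hrs] at hmem
      exact List.not_mem_nil hmem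
    rw [pvAltNil grid hrect hz]
    simp
  · obtain ⟨hd, tl, hcons⟩ := List.exists_cons_of_ne_nil hrs
    have hhd : hd ∈ rs := by rw [hcons]; exact List.mem_cons_self
    have hcsne : cs ≠ [] := by
      obtain ⟨p, hp, hfst⟩ := List.mem_map.1 ((hLrdef ▸ hLrmem hd).2 hhd)
      have hsnd : p.2 ∈ Lc := by rw [hLcdef]; exact List.mem_map_of_mem hp
      intro hnil
      have h := (hLcmem p.2).1 hsnd
      rw [hnil] at h
      exact List.not_mem_nil h
    obtain ⟨hd', tl', hcons'⟩ := List.exists_cons_of_ne_nil hcsne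
    have hmemr : ∀ x, x ∈ Lr ↔ x ∈ hd :: tl := by intro x; rw [← hcons]; exact hLrmem x
    have hmemc : ∀ x, x ∈ Lc ↔ x ∈ hd' :: tl' := by intro x; rw [← hcons']; exact hLcmem x
    have hminr : List.foldl min n Lr = List.foldl min hd tl :=
      pvMinEq Lr tl n hd hmemr (fun x hx => hrslt x ((hLrmem x).1 hx))
    have hmaxr : List.foldl max 0 Lr = List.foldl max hd tl := pvMaxEq Lr tl hd hmemr
    have hcslt : ∀ x ∈ cs, x < w := by
      intro x hx; rw [hcsdef] at hx
      exact List.mem_range.1 (List.mem_filter.1 hx).1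
    have hminc : List.foldl min w Lc = List.foldl min hd' tl' :=
      pvMinEq Lc tl' w hd' hmemc (fun x hx => hcslt x ((hLcmem x).1 hx))
    have hmaxc : List.foldl max 0 Lc = List.foldl max hd' tl' := pvMaxEq Lc tl' hd' hmemc
    rw [hminr, hmaxr, hminc, hmaxc, pvAltBox grid hrect hd tl hd' tl' hcons hcons']
    rfl

-- ===== VERDICT (by name: the statement is the Claim_ definition above) =====
theorem solve_28bf18c6_spec : Claim_equal_solve_28bf18c6 := by
  intro grid _ hpre
  unfold Spec_solve_28bf18c6
  exact pv_main grid hpre.1 hpre.2
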